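-- pv_equiv track=rewrite | github.com/lucainnocenti/quantum-gate-learning-1803.07119 | src/qubit_network/analytical_conditions.py | _nwise_interactions
-- ===== SOURCE A (Python) =====
-- import itertools
--
-- def _nwise_interactions(num_qubits, n):
--     """Return interaction indices corresponding to n-qubit interactions.
--     """
--     if n > num_qubits:
--         raise ValueError('`n` must be lower than the number of qubits.')
--     interactions = []
--     tuples = itertools.combinations(range(num_qubits), n)
--     for qtuple in tuples:
--         for pindices in itertools.product(*[range(1, 4)] * n):
--             term = [0] * num_qubits
--             for q, p in zip(qtuple, pindices):
--                 term[q] = p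
--             interactions.append(tuple(term))
--     return interactions
-- ===== SOURCE B (Python) =====
-- import itertools
--
-- def _nwise_interactions(num_qubits, n):
--     """Return interaction indices corresponding to n-qubit interactions."""
--     if n > num_qubits:
--         raise ValueError('`n` must be lower than the number of qubits.')
--     interactions = []
--     for qtuple in itertools.combinations(range(num_qubits), n):
--         # Grow the block of terms one selected qubit at a time: splicing each
--         # Pauli value into every term produced so far keeps earlier qubits
--         # cycling slowest, which is exactly itertools.product order.
--         block = [(0,) * num_qubits]
--         for q in qtuple:
--             block = [t[:q] + (p,) + t[q + 1:] for t in block for p in (1, 2, 3)]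
--         interactions.extend(block)
--     return interactions
-- ===== Notes on version B (the rewrite author's own statement) =====
-- stated objective: alternative
-- what changed: B drops itertools.product and the zero-list scatter step: per combination it grows the block of terms incrementally, splicing each Pauli value 1..3 into one selected position of every term produced so far (list-rewriting expansion instead of a cartesian product of index ranges).
import Mathlib
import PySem

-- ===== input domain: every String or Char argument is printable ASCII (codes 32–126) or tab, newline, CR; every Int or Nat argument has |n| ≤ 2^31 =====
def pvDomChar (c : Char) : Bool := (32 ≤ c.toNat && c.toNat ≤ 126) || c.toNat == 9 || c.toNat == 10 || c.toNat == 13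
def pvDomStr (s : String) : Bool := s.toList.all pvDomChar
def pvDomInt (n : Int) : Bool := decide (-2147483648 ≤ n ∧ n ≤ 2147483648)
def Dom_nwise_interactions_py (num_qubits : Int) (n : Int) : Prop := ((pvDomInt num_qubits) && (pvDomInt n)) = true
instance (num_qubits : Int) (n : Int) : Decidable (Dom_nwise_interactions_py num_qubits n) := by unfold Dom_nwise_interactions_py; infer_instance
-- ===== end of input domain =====

-- B replaces itertools.product + zero-list scatter by an incremental block expansion
-- that splices each Pauli value into one selected slot of every term built so far;
-- objective: alternative (same cost, different mechanism).

-- ===== PORT A =====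

-- itertools.combinations(l, k) in lexicographic order (shared helper: both Pythons call it)
def pyCombos : Nat → List Int → List (List Int)
  | 0, _ => [[]]
  | _+1, [] => []
  | k+1, x::xs => (pyCombos k xs).map (fun q => x :: q) ++ pyCombos (k+1) xs
termination_by _ l => l.length

-- itertools.product(*[range(1, 4)] * k): first coordinate cycles slowest
def pyProd3 : Nat → List (List Int)
  | 0 => [[]]
  | k+1 => (PySem.List.pyRange 1 4 1).flatMap (fun p => (pyProd3 k).map (fun ps => p :: ps))

-- the inner scatter loop: term = [0]*N; for q, p in zip(qtuple, pindices): term[q] = p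
def pyScatter (N : Nat) (qtuple pindices : List Int) : List Int :=
  (qtuple.zip pindices).foldl (fun t qp => t.set qp.1.toNat qp.2) (List.replicate N 0)

def nwise_interactions_py (num_qubits : Int) (n : Int) : List (List Int) :=
  if n > num_qubits then []   -- Python raises ValueError here (outside Pre_)
  else
    (pyCombos n.toNat (PySem.List.pyRange 0 num_qubits 1)).foldl
      (fun acc qtuple =>
        acc ++ (pyProd3 n.toNat).map (fun ps => pyScatter num_qubits.toNat qtuple ps)) []

-- ===== PORT B =====

-- one expansion step of B's list comprehension:
-- [t[:q] + (p,) + t[q+1:] for t in block for p in (1, 2, 3)]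
def expandStep (block : List (List Int)) (q : Int) : List (List Int) :=
  block.flatMap (fun t =>
    ([1, 2, 3] : List Int).map (fun p =>
      PySem.List.slice t none (some q) ++ [p] ++ PySem.List.slice t (some (q + 1)) none))

def nwise_interactions_py_alt (num_qubits : Int) (n : Int) : List (List Int) :=
  if n > num_qubits then []   -- Python raises ValueError here (outside Pre_)
  else
    (pyCombos n.toNat (PySem.List.pyRange 0 num_qubits 1)).foldl
      (fun acc qtuple =>
        acc ++ qtuple.foldl expandStep [List.replicate num_qubits.toNat 0]) []

-- ===== PRECONDITION & SPEC =====
-- Python raises ValueError when n > num_qubits (A's explicit raise) or n < 0 (itertools.combinations).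
def Pre_nwise_interactions_py (num_qubits : Int) (n : Int) : Prop := 0 ≤ n ∧ n ≤ num_qubits
instance (num_qubits : Int) (n : Int) : Decidable (Pre_nwise_interactions_py num_qubits n) := by
  unfold Pre_nwise_interactions_py; infer_instance
def pvWitness_nwise_interactions_py : Int × Int := (3, 2)

def Spec_nwise_interactions_py (num_qubits : Int) (n : Int) (out : List (List Int)) : Prop := out = nwise_interactions_py_alt num_qubits n
instance (num_qubits : Int) (n : Int) (out : List (List Int)) : Decidable (Spec_nwise_interactions_py num_qubits n out) := by unfold Spec_nwise_interactions_py; infer_instance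

-- ===== CLAIM (what is proved, stated in full; the proofs are below) =====
def Claim_equal_nwise_interactions_py : Prop := ∀ (num_qubits : Int) (n : Int), Dom_nwise_interactions_py num_qubits n → Pre_nwise_interactions_py num_qubits n → Spec_nwise_interactions_py num_qubits n (nwise_interactions_py num_qubits n)

-- ===== LEMMAS AND PROOFS =====

theorem pyCombos_sublist {k : Nat} {l q : List Int} (h : q ∈ pyCombos k l) : q.Sublist l := by
  induction l generalizing k q with
  | nil =>
      cases k with
      | zero => simp [pyCombos] at h; simp [h]
      | succ k => simp [pyCombos] at h
  | cons x xs ih =>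
      cases k with
      | zero => simp [pyCombos] at h; simp [h]
      | succ k =>
          simp only [pyCombos, List.mem_append, List.mem_map] at h
          rcases h with ⟨q', hq', rfl⟩ | h
          · exact List.Sublist.cons₂ x (ih hq')
          · exact List.Sublist.cons x (ih h)

theorem pyRange14 : PySem.List.pyRange 1 4 1 = [1, 2, 3] := by decide

-- the set-based expansion step (what splicing amounts to on in-range indices)
def setStep (block : List (List Int)) (q : Int) : List (List Int) :=
  block.flatMap (fun t => ([1, 2, 3] : List Int).map (fun p => t.set q.toNat p))

-- splicing a value at an in-range nonnegative index is List.set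
theorem splice_eq_set (t : List Int) (q : Int) (p : Int)
    (h0 : 0 ≤ q) (hlt : q.toNat < t.length) :
    PySem.List.slice t none (some q) ++ [p] ++ PySem.List.slice t (some (q + 1)) none
      = t.set q.toNat p := by
  obtain ⟨j, rfl⟩ : ∃ j : Nat, q = (j : Int) := ⟨q.toNat, by omega⟩
  simp only [Int.toNat_natCast] at hlt ⊢
  rw [PySem.List.slice_to_natCast,
      show ((j : Int) + 1) = ((j + 1 : Nat) : Int) by push_cast; ring,
      PySem.List.slice_from_natCast]
  apply List.ext_getElem
  · simp; omega
  · intro i h1 h2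
    simp only [List.getElem_set]
    by_cases hi : i < j
    · rw [List.getElem_append_left (by simp; omega)]
      rw [List.getElem_append_left (by simp; omega)]
      simp only [List.getElem_take]
      rw [if_neg (by omega)]
    · by_cases hie : j = i
      · subst hie
        rw [List.getElem_append_left (by simp; omega), List.getElem_append_right (by simp)]
        simp
      · rw [List.getElem_append_right (by simp; omega)]
        simp only [List.length_append, List.length_take, List.length_cons, List.length_nil,
          List.getElem_drop]
        rw [if_neg hie]
        congr 1
        simp at h2 ⊢
        omega

-- set preserves length, hence all terms in the block keep length N under setStep
theorem setStep_length {N : Nat} {block : List (List Int)} (q : Int)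
    (h : ∀ t ∈ block, t.length = N) : ∀ t ∈ setStep block q, t.length = N := by
  intro t ht
  simp only [setStep, List.mem_flatMap, List.mem_map] at ht
  obtain ⟨u, hu, p, _, rfl⟩ := ht
  simp [h u hu]

-- on blocks of N-length terms and in-range indices, B's splice step is the set step
theorem fold_expand_eq_fold_set (qt : List Int) :
    ∀ (N : Nat) (block : List (List Int)),
      (∀ x ∈ qt, 0 ≤ x ∧ x.toNat < N) → (∀ t ∈ block, t.length = N) →
      qt.foldl expandStep block = qt.foldl setStep block := by
  induction qt with
  | nil => intro N block _ _; rfl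
  | cons x qt ih =>
      intro N block hb hl
      have hx := hb x (List.mem_cons_self ..)
      have hstep : expandStep block x = setStep block x := by
        unfold expandStep setStep
        apply List.flatMap_congr
        intro t ht
        apply List.map_congr_left
        intro p _
        exact splice_eq_set t x p hx.1 (by rw [hl t ht]; exact hx.2)
      simp only [List.foldl_cons, hstep]
      exact ih N (setStep block x) (fun y hy => hb y (List.mem_cons_of_mem _ hy))
        (setStep_length x hl)

-- the set-based expansion fold computes exactly A's product-and-scatter block
theorem fold_set_eq_prod_scatter (qt : List Int) :
    ∀ (block : List (List Int)),
      qt.foldl setStep block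
        = block.flatMap (fun t =>
            (pyProd3 qt.length).map (fun ps =>
              (qt.zip ps).foldl (fun t qp => t.set qp.1.toNat qp.2) t)) := by
  induction qt with
  | nil =>
      intro block
      simp [pyProd3]
  | cons x qt ih =>
      intro block
      rw [List.foldl_cons, ih (setStep block x)]
      simp only [setStep, List.flatMap_assoc, List.length_cons, pyProd3, pyRange14]
      apply List.flatMap_congr
      intro t _
      simp only [List.flatMap_map, List.map_flatMap, List.map_map]
      apply List.flatMap_congr
      intro p _
      apply List.map_congr_left
      intro ps _
      rfl

-- length of a combination is k
theorem pyCombos_length {k : Nat} {l q : List Int} (h : q ∈ pyCombos k l) : q.length = k := by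
  induction l generalizing k q with
  | nil =>
      cases k with
      | zero => simp [pyCombos] at h; simp [h]
      | succ k => simp [pyCombos] at h
  | cons x xs ih =>
      cases k with
      | zero => simp [pyCombos] at h; simp [h]
      | succ k =>
          simp only [pyCombos, List.mem_append, List.mem_map] at h
          rcases h with ⟨q', hq', rfl⟩ | h
          · simp [ih hq']
          · exact ih h

-- per combination: B's expansion block equals A's scatter image
theorem block_eq_scatter (N : Int) (hN : 0 ≤ N) (k : Nat) (qt : List Int)
    (hq : qt ∈ pyCombos k (PySem.List.pyRange 0 N 1)) :
    qt.foldl expandStep [List.replicate N.toNat 0]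
      = (pyProd3 k).map (fun ps => pyScatter N.toNat qt ps) := by
  have hsub := pyCombos_sublist hq
  have hbound : ∀ x ∈ qt, 0 ≤ x ∧ x.toNat < N.toNat := by
    intro x hx
    have := PySem.List.mem_pyRange_one.mp (hsub.subset hx)
    omega
  have hlen : qt.length = k := pyCombos_length hq
  rw [fold_expand_eq_fold_set qt N.toNat [List.replicate N.toNat 0] hbound
        (by intro t ht; simp at ht; simp [ht]),
      fold_set_eq_prod_scatter, hlen]
  simp [pyScatter]

-- ===== VERDICT (by name: the statement is the Claim_ definition above) =====
theorem nwise_interactions_py_spec : Claim_equal_nwise_interactions_py := by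
  intro num_qubits n _ hpre
  unfold Spec_nwise_interactions_py nwise_interactions_py nwise_interactions_py_alt
  obtain ⟨h0, hle⟩ := hpre
  rw [if_neg (by omega), if_neg (by omega)]
  apply PySem.List.foldl_congr_mem
  intro acc q hq
  rw [block_eq_scatter num_qubits (by omega) n.toNat q hq]
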